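-- pv_equiv track=rewrite | github.com/Parapet-Tech/parapet | parapet-data/parapet_data/sampler.py | _merge_degraded_mode
-- ===== SOURCE A (Python) =====
-- def _merge_degraded_mode(existing: str | None, tags: list[str]) -> str | None:
--     modes: set[str] = set()
--     if existing:
--         modes.update(m for m in existing.split("+") if m)
--     modes.update(t for t in tags if t)
--     if not modes:
--         return None
--     return "+".join(sorted(modes))
-- ===== SOURCE B (Python) =====
-- def _merge_degraded_mode(existing, tags):
--     toks = []
--     if existing:
--         toks.extend(existing.split("+"))
--     toks.extend(tags)
--     toks = sorted(t for t in toks if t)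
--     merged = []
--     prev = None
--     for t in toks:
--         if t != prev:
--             merged.append(t)
--             prev = t
--     if not merged:
--         return None
--     return "+".join(merged)
-- ===== Notes on version B (the rewrite author's own statement) =====
-- stated objective: alternative
-- what changed: Replaces A's hash-set accumulation (set.update from both sources, then sorted(set)) by collecting all non-empty tokens into one list, sorting it once, and deduplicating by a single adjacency scan tracking the previous kept token.
import Mathlib
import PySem

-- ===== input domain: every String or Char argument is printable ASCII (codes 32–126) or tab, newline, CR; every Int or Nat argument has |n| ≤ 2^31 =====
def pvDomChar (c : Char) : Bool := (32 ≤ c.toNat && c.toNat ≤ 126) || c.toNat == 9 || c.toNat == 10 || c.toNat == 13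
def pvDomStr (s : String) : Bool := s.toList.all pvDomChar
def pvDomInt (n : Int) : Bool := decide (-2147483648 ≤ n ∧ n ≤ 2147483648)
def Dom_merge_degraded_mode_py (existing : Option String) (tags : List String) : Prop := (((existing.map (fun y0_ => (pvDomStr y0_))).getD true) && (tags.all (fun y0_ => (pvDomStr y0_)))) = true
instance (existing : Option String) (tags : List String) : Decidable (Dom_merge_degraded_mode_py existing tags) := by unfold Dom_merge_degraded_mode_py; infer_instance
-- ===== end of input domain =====

-- B replaces A's set-then-sort by sort-all-tokens-then-adjacent-dedup (alternative decomposition, same cost).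

-- ===== PORT A =====
def merge_degraded_mode_py (existing : Option String) (tags : List String) : Option String :=
  let modes : PySem.Set String := PySem.Set.empty
  let modes := match existing with
    | none => modes
    | some s =>
        if s = "" then modes
        else PySem.Set.update modes (((PySem.Str.split? s "+").getD []).filter (fun m => m ≠ ""))
  let modes := PySem.Set.update modes (tags.filter (fun t => t ≠ ""))
  if modes = [] then none
  else some (PySem.Str.join "+" (PySem.List.sorted modes (fun x => x) false))

-- ===== PORT B =====
-- the 'for t in toks' loop of Source B, state = (merged, prev)
def pvAdjLoop : List String → List String → Option String → List String
  | [], merged, _ => merged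
  | t :: rest, merged, prev =>
      if some t ≠ prev then pvAdjLoop rest (merged ++ [t]) (some t)
      else pvAdjLoop rest merged prev

def merge_degraded_mode_py_alt (existing : Option String) (tags : List String) : Option String :=
  let toks : List String := match existing with
    | none => []
    | some s => if s = "" then [] else (PySem.Str.split? s "+").getD []
  let toks := toks ++ tags
  let toks := PySem.List.sorted (toks.filter (fun t => t ≠ "")) (fun x => x) false
  let merged := pvAdjLoop toks [] none
  if merged = [] then none
  else some (PySem.Str.join "+" merged)

-- ===== PRECONDITION & SPEC =====
def Spec_merge_degraded_mode_py (existing : Option String) (tags : List String) (out : Option String) : Prop := out = merge_degraded_mode_py_alt existing tags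
instance (existing : Option String) (tags : List String) (out : Option String) : Decidable (Spec_merge_degraded_mode_py existing tags out) := by unfold Spec_merge_degraded_mode_py; infer_instance

-- ===== CLAIM (what is proved, stated in full; the proofs are below) =====
def Claim_equal_merge_degraded_mode_py : Prop := ∀ (existing : Option String) (tags : List String), Dom_merge_degraded_mode_py existing tags → Spec_merge_degraded_mode_py existing tags (merge_degraded_mode_py existing tags)

-- ===== LEMMAS AND PROOFS =====

-- recursion-on-the-head form of the adjacency loop
def pvAdj : List String → Option String → List String
  | [], _ => []
  | t :: rest, prev => if some t ≠ prev then t :: pvAdj rest (some t) else pvAdj rest prev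

theorem pvAdjLoop_eq : ∀ (xs m : List String) (p : Option String), pvAdjLoop xs m p = m ++ pvAdj xs p := by
  intro xs; induction xs with
  | nil => intro m p; simp [pvAdjLoop, pvAdj]
  | cons t rest ih =>
      intro m p
      by_cases h : some t = p <;> simp [pvAdjLoop, pvAdj, h, ih]

theorem pvAdj_props : ∀ (ys : List String) (prev : Option String),
    ys.Pairwise (· ≤ ·) →
    (∀ p, prev = some p → ∀ y ∈ ys, p ≤ y) →
    (pvAdj ys prev).Pairwise (· < ·) ∧ ∀ a, a ∈ pvAdj ys prev ↔ a ∈ ys ∧ prev ≠ some a := by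
  intro ys; induction ys with
  | nil => intro prev _ _; simp [pvAdj]
  | cons t rest ih =>
      intro prev hpw hlb
      have ht : ∀ y ∈ rest, t ≤ y := (List.pairwise_cons.mp hpw).1
      have hpwr : rest.Pairwise (· ≤ ·) := (List.pairwise_cons.mp hpw).2
      have hlb' : ∀ p, (some t : Option String) = some p → ∀ y ∈ rest, p ≤ y := by
        intro p hp y hy; cases hp; exact ht y hy
      obtain ⟨h1, h2⟩ := ih (some t) hpwr hlb'
      by_cases h : some t = prev
      · -- skip: t equals prev
        subst h
        have hstep : pvAdj (t :: rest) (some t) = pvAdj rest (some t) := by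
          simp [pvAdj]
        rw [hstep]
        refine ⟨h1, ?_⟩
        intro a
        rw [h2 a]
        constructor
        · rintro ⟨ha, hne⟩; exact ⟨List.mem_cons_of_mem _ ha, hne⟩
        · rintro ⟨ha, hne⟩
          rcases List.mem_cons.mp ha with rfl | ha
          · exact absurd rfl hne
          · exact ⟨ha, hne⟩
      · -- keep t
        have hstep : pvAdj (t :: rest) prev = t :: pvAdj rest (some t) := by
          simp [pvAdj, h]
        rw [hstep]
        constructor
        · refine List.pairwise_cons.mpr ⟨?_, h1⟩
          intro a ha
          obtain ⟨har, hne⟩ := (h2 a).mp ha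
          exact lt_of_le_of_ne (ht a har) (fun he => hne (by rw [he]))
        · intro a
          simp only [List.mem_cons]
          rw [h2 a]
          constructor
          · rintro (rfl | ⟨ha, hne⟩)
            · exact ⟨Or.inl rfl, fun hp => h hp.symm⟩
            · refine ⟨Or.inr ha, ?_⟩
              rintro rfl
              have hat : a ≤ t := hlb a rfl t List.mem_cons_self
              have hta : t ≤ a := ht a ha
              exact h (by rw [le_antisymm hta hat])
          · rintro ⟨(rfl | ha), hne⟩
            · exact Or.inl rfl
            · by_cases hat : a = t
              · exact Or.inl hat
              · exact Or.inr ⟨ha, fun he => hat (by injection he with h'; exact h'.symm)⟩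

theorem pvMain (base tags : List String) :
    (if (PySem.Set.update (PySem.Set.update PySem.Set.empty (base.filter (fun m => m ≠ ""))) (tags.filter (fun t => t ≠ "")) : List String) = [] then (none : Option String)
     else some (PySem.Str.join "+" (PySem.List.sorted (PySem.Set.update (PySem.Set.update PySem.Set.empty (base.filter (fun m => m ≠ ""))) (tags.filter (fun t => t ≠ ""))) (fun x => x) false)))
    = (if pvAdjLoop (PySem.List.sorted ((base ++ tags).filter (fun t => t ≠ "")) (fun x => x) false) [] none = [] then none
       else some (PySem.Str.join "+" (pvAdjLoop (PySem.List.sorted ((base ++ tags).filter (fun t => t ≠ "")) (fun x => x) false) [] none))) := by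
  set P : String → Bool := fun t => decide (t ≠ "") with hP
  set modes : List String := PySem.Set.update (PySem.Set.update PySem.Set.empty (base.filter P)) (tags.filter P) with hmodes
  set L : List String := (base ++ tags).filter P with hL
  set ys : List String := PySem.List.sorted L (fun x => x) false with hys
  have hmemmodes : ∀ a, a ∈ modes ↔ a ∈ L := by
    intro a
    rw [hmodes, hL, List.filter_append]
    rw [PySem.Set.mem_update, PySem.Set.mem_update]
    simp [PySem.Set.empty]
  have hnodmodes : modes.Nodup := by
    rw [hmodes]
    exact PySem.Set.nodup_update _ _ (PySem.Set.nodup_update _ _ List.nodup_nil)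
  have hmerged : pvAdjLoop ys [] none = pvAdj ys none := by
    rw [pvAdjLoop_eq]; simp
  have hyspw : ys.Pairwise (· ≤ ·) := by
    exact PySem.List.sorted_pairwise (xs := L) (key := fun x => x)
  obtain ⟨hpw, hmem⟩ := pvAdj_props ys none hyspw (by intro p hp; cases hp)
  have hnodadj : (pvAdj ys none).Nodup := hpw.imp (fun h => ne_of_lt h)
  have hperm : (pvAdj ys none).Perm modes := by
    rw [List.perm_ext_iff_of_nodup hnodadj hnodmodes]
    intro a
    rw [hmem a, hmemmodes a, hys, PySem.List.mem_sorted]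
    simp
  have hsorted : PySem.List.sorted modes (fun x => x) false = pvAdj ys none :=
    PySem.List.sorted_eq_of_perm_of_pairwise_lt _ _ _ hperm hpw
  have hempty : (modes = []) ↔ (pvAdj ys none = []) := by
    constructor
    · intro h; rw [h] at hperm; exact hperm.eq_nil
    · intro h; rw [h] at hperm; exact hperm.symm.eq_nil
  rw [hmerged]
  by_cases h0 : modes = []
  · rw [if_pos h0, if_pos (hempty.mp h0)]
  · rw [if_neg h0, if_neg (fun hc => h0 (hempty.mpr hc)), hsorted]

-- ===== VERDICT (by name: the statement is the Claim_ definition above) =====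
theorem merge_degraded_mode_py_spec : Claim_equal_merge_degraded_mode_py := by
  intro existing tags _
  show merge_degraded_mode_py existing tags = merge_degraded_mode_py_alt existing tags
  rcases existing with _ | s
  · simpa [merge_degraded_mode_py, merge_degraded_mode_py_alt] using pvMain [] tags
  · by_cases hs : s = ""
    · simpa [merge_degraded_mode_py, merge_degraded_mode_py_alt, hs] using pvMain [] tags
    · simpa [merge_degraded_mode_py, merge_degraded_mode_py_alt, hs] using
        pvMain ((PySem.Str.split? s "+").getD []) tags
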